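-- pv_equiv track=rewrite | github.com/Shaniagrg/Python_Introductiom | array/2d_colum.py | sum_column
-- ===== SOURCE A (Python) =====
-- def sum_column(a:list[int]) -> list[int]:
--     sum:list[int] = []
--     if len(a) == 0:
--         sum.append(a)
--         return sum
--     else:
--         total_column:int = len(a[0])
--         for column in range(total_column):
--             total:int = 0
--
--             for row in range(len(a)):
--                 total = total + a[row][column]
--
--             sum.append(total)
--
--         return sum
-- ===== SOURCE B (Python) =====
-- def sum_column(a: list[int]) -> list[int]:
--     # single row-major pass maintaining a running-totals array
--     totals: list[int] = [0] * len(a[0])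
--     for row in a:
--         for j in range(len(totals)):
--             totals[j] += row[j]
--     return totals
-- ===== Notes on version B (the rewrite author's own statement) =====
-- stated objective: alternative
-- what changed: Instead of computing each column sum independently (column-major nested loops that re-scan all rows per column), B maintains one running-totals array and accumulates it in a single row-major pass over the rows.
-- outside the precondition, e.g. on sum_column([]): A returns [[]], B raises IndexError
import Mathlib
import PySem

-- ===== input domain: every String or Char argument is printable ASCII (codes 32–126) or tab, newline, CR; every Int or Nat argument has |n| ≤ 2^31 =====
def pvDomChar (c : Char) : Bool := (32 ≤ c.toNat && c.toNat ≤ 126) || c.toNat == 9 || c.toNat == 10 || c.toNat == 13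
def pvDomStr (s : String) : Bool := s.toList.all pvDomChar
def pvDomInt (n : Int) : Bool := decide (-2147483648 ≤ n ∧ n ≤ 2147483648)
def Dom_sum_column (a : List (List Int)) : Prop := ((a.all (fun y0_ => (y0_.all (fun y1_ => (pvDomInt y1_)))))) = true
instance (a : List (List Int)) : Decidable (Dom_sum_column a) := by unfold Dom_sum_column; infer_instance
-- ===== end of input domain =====

-- B replaces A's column-major nested loops (a full row scan per column) by a single
-- row-major pass maintaining a running-totals array: alternative decomposition, same cost.


-- ===== PORT A =====
def sum_column (a : List (List Int)) : List Int :=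
  if a.length = 0 then
    []  -- Python returns [a] = [[]] here, not a list[int]; this input is excluded by Pre_sum_column
  else
    let total_column : Int := ((PySem.List.pyGetD a 0 []).length : Int)
    (PySem.List.pyRange 0 total_column 1).foldl
      (fun sum column =>
        let total : Int :=
          (PySem.List.pyRange 0 (a.length : Int) 1).foldl
            (fun total row =>
              total + PySem.List.pyGetD (PySem.List.pyGetD a row []) column 0) 0
        sum ++ [total]) []

-- ===== PORT B =====
def sum_column_alt (a : List (List Int)) : List Int :=
  let totals : List Int := List.replicate (PySem.List.pyGetD a 0 []).length (0 : Int)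
  a.foldl
    (fun totals row =>
      (PySem.List.pyRange 0 (totals.length : Int) 1).foldl
        (fun totals j =>
          PySem.List.pySetD totals j
            (PySem.List.pyGetD totals j 0 + PySem.List.pyGetD row j 0))
        totals)
    totals

-- ===== PRECONDITION & SPEC =====
-- Pre_ excludes the empty matrix, where Python A returns [a] = [[]] (not a value of type
-- list[int]), and ragged matrices where some row is shorter than the first row, on which
-- Python A raises IndexError.
def Pre_sum_column (a : List (List Int)) : Prop :=
  a ≠ [] ∧ ∀ r ∈ a, (a.headD []).length ≤ r.length
instance (a : List (List Int)) : Decidable (Pre_sum_column a) := by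
  unfold Pre_sum_column; infer_instance
def pvWitness_sum_column : List (List Int) := [[1, 2], [3, 4], [5, 6]]
def Spec_sum_column (a : List (List Int)) (out : List Int) : Prop := out = sum_column_alt a
instance (a : List (List Int)) (out : List Int) : Decidable (Spec_sum_column a out) := by
  unfold Spec_sum_column; infer_instance

-- ===== CLAIM (what is proved, stated in full; the proofs are below) =====
def Claim_equal_sum_column : Prop :=
  ∀ (a : List (List Int)), Dom_sum_column a → Pre_sum_column a →
    Spec_sum_column a (sum_column a)

-- ===== LEMMAS AND PROOFS =====

-- the value both programs put in output slot k: the sum of column k (defaulting 0 where a row is short)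
def pvColSum (a : List (List Int)) (k : Nat) : Int :=
  (a.map (fun r => PySem.List.pyGetD r (k : Int) 0)).sum

lemma pv_self_eq_map_range (t : List Int) :
    t = (List.range t.length).map (fun k => t.getD k 0) := by
  apply List.ext_getElem
  · simp
  · intro i h1 h2
    simp at h1
    simp [List.getD_eq_getElem?_getD, List.getElem?_eq_getElem h1]

lemma pv_getD_set_ne (t : List Int) (i j : Nat) (v : Int) (h : i ≠ j) :
    (t.set i v).getD j 0 = t.getD j 0 := by
  simp [List.getD, List.getElem?_set_ne h]

lemma pv_take_succ_set (t : List Int) (i : Nat) (v : Int) (h : i < t.length) :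
    (t.set i v).take (i + 1) = t.take i ++ [v] := by
  rw [List.set_eq_take_cons_drop v h, List.take_append]
  simp [List.take_of_length_le, Nat.min_eq_left h.le]

-- B's inner loop: folding one row into the totals array rewrites every slot once
lemma pv_step_aux (row : List Int) :
    ∀ (n i : Nat) (t : List Int), t.length = i + n →
      (PySem.List.pyRange (i : Int) (t.length : Int) 1).foldl
        (fun t j =>
          PySem.List.pySetD t j
            (PySem.List.pyGetD t j 0 + PySem.List.pyGetD row j 0)) t
      = t.take i ++ (List.range n).map
          (fun k => t.getD (i + k) 0 + PySem.List.pyGetD row ((i + k : Nat) : Int) 0) := by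
  intro n
  induction n with
  | zero =>
    intro i t ht
    have he : ((t.length : Int)) ≤ (i : Int) := by exact_mod_cast (by omega : t.length ≤ i)
    rw [PySem.List.pyRange_one_eq_nil he]
    simp [List.take_of_length_le (by omega : t.length ≤ i)]
  | succ n ih =>
    intro i t ht
    have hi : i < t.length := by omega
    rw [PySem.List.pyRange_one_cons (by exact_mod_cast hi)]
    simp only [List.foldl_cons]
    have hse : PySem.List.pySetD t (i : Int)
        (PySem.List.pyGetD t (i : Int) 0 + PySem.List.pyGetD row (i : Int) 0)
      = t.set i (t.getD i 0 + PySem.List.pyGetD row (i : Int) 0) := by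
      simp
    rw [hse]
    set v : Int := t.getD i 0 + PySem.List.pyGetD row (i : Int) 0 with hv
    have hlen : (t.set i v).length = (i + 1) + n := by simp; omega
    have hcast : ((i : Int) + 1) = (((i + 1 : Nat)) : Int) := by push_cast; ring
    rw [hcast]
    have hrec := ih (i + 1) (t.set i v) hlen
    rw [List.length_set] at hrec
    rw [hrec, pv_take_succ_set t i v hi]
    rw [List.range_succ_eq_map, List.map_cons, List.map_map]
    have hmap : (List.range n).map
          (fun k => (t.set i v).getD (i + 1 + k) 0 + PySem.List.pyGetD row ((i + 1 + k : Nat) : Int) 0)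
        = (List.range n).map
          ((fun k => t.getD (i + k) 0 + PySem.List.pyGetD row ((i + k : Nat) : Int) 0) ∘ Nat.succ) := by
      apply List.map_congr_left
      intro k _
      simp only [Function.comp]
      rw [pv_getD_set_ne t i (i + 1 + k) v (by omega)]
      have : i + 1 + k = i + (k + 1) := by omega
      rw [this]
    rw [hmap]
    simp [hv, List.getD]

lemma pv_step_eq (row t : List Int) :
    (PySem.List.pyRange 0 (t.length : Int) 1).foldl
      (fun t j =>
        PySem.List.pySetD t j
          (PySem.List.pyGetD t j 0 + PySem.List.pyGetD row j 0)) t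
    = (List.range t.length).map
        (fun k => t.getD k 0 + PySem.List.pyGetD row ((k : Nat) : Int) 0) := by
  have h := pv_step_aux row t.length 0 t (by omega)
  simpa using h

-- B's outer loop: invariant over the rows already folded in
lemma pv_outer_eq (m : Nat) (rows : List (List Int)) :
    ∀ (t : List Int), t.length = m →
      rows.foldl
        (fun totals row =>
          (PySem.List.pyRange 0 (totals.length : Int) 1).foldl
            (fun totals j =>
              PySem.List.pySetD totals j
                (PySem.List.pyGetD totals j 0 + PySem.List.pyGetD row j 0))
            totals)
        t
      = (List.range m).map (fun k => t.getD k 0 + pvColSum rows k) := by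
  induction rows with
  | nil =>
    intro t ht
    simp [pvColSum]
    rw [← ht]
    exact pv_self_eq_map_range t
  | cons row rows ih =>
    intro t ht
    simp only [List.foldl_cons]
    rw [pv_step_eq row t, ht]
    rw [ih _ (by simp)]
    apply List.map_congr_left
    intro k hk
    simp at hk
    have hget : ((List.range m).map
        (fun k => t.getD k 0 + PySem.List.pyGetD row ((k : Nat) : Int) 0)).getD k 0
        = t.getD k 0 + PySem.List.pyGetD row ((k : Nat) : Int) 0 := by
      simp [List.getD_eq_getElem?_getD, List.getElem?_map, List.getElem?_range hk]
    rw [hget]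
    simp [pvColSum, add_assoc]

lemma pv_A_eq (a : List (List Int)) (h : a ≠ []) :
    sum_column a
      = (List.range (PySem.List.pyGetD a 0 []).length).map (fun k => pvColSum a k) := by
  unfold sum_column
  rw [if_neg (by simpa using h)]
  rw [PySem.List.foldl_append_singleton_eq_map, List.nil_append]
  have hfun : (fun column : Int =>
      (PySem.List.pyRange 0 (a.length : Int) 1).foldl
        (fun total row => total + PySem.List.pyGetD (PySem.List.pyGetD a row []) column 0) 0)
      = fun column : Int => (a.map (fun r => PySem.List.pyGetD r column 0)).sum := by
    funext column
    rw [PySem.List.foldl_pyRange_zero_pyGetD' a [] (fun acc r => acc + PySem.List.pyGetD r column 0) 0]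
    rw [PySem.List.foldl_add]
    simp
  rw [hfun, PySem.List.pyRange_zero_natCast, List.map_map]
  simp [pvColSum, Function.comp]

lemma pv_B_eq (a : List (List Int)) :
    sum_column_alt a
      = (List.range (PySem.List.pyGetD a 0 []).length).map (fun k => pvColSum a k) := by
  unfold sum_column_alt
  rw [pv_outer_eq (PySem.List.pyGetD a 0 []).length a _ (by simp)]
  apply List.map_congr_left
  intro k hk
  simp at hk
  simp [List.getD_eq_getElem?_getD, hk]

-- ===== VERDICT (by name: the statement is the Claim_ definition above) =====
theorem sum_column_spec : Claim_equal_sum_column := by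
  intro a _ hpre
  unfold Spec_sum_column
  rw [pv_A_eq a hpre.1, pv_B_eq a]
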